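-- pv_equiv track=rewrite | github.com/nafisa-progga/building_code_stage-1 | viewer_streamlit.py | _split_math_segments
-- ===== SOURCE A (Python) =====
-- def _split_math_segments(s: str):
--     """
--     Split a string into alternating (text, is_inside_math) segments based on
--     $...$ delimiters.  Single-dollar delimiters only (KaTeX inline math).
--
--     Follows standard Markdown/KaTeX delimiter rules to avoid false positives
--     on malformed stored values (e.g. comparison operators eaten by the HTML
--     stripper producing "$H/D $C_p = -1.0$ for $x..." where "$ for $" would
--     otherwise be misidentified as a math block):
--       - Opening $: must NOT be immediately followed by whitespace.
--       - Closing $: must NOT be immediately preceded by whitespace.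
--
--     Returns list of (segment_str, is_math) tuples.
--     Already-delimited regions are left exactly as-is so downstream code
--     never double-wraps them.
--     """
--     parts = []
--     i = 0
--     s = str(s)
--     while i < len(s):
--         dollar = s.find('$', i)
--         if dollar == -1:
--             if i < len(s):
--                 parts.append((s[i:], False))
--             break
--
--         # Check valid opening: character after $ must not be whitespace
--         next_ch = s[dollar + 1] if dollar + 1 < len(s) else ''
--         if next_ch in (' ', '\t', '\n', '\r') or next_ch == '':
--             # Not a valid math opener — treat this $ as plain text
--             parts.append((s[i:dollar + 1], False))
--             i = dollar + 1
--             continue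
--
--         if dollar > i:
--             parts.append((s[i:dollar], False))
--
--         # Find closing $ — must not be preceded by whitespace
--         j = dollar + 1
--         close = -1
--         while j < len(s):
--             cand = s.find('$', j)
--             if cand == -1:
--                 break
--             if s[cand - 1] not in (' ', '\t', '\n', '\r'):
--                 close = cand
--                 break
--             j = cand + 1
--
--         if close == -1:
--             # Unclosed — treat remainder as plain text
--             parts.append((s[dollar:], False))
--             break
--         parts.append((s[dollar:close + 1], True))   # includes the $...$
--         i = close + 1
--     return parts
-- ===== SOURCE B (Python) =====
-- def _split_math_segments(s: str):
--     """Single-pass character state machine over s: keeps a segment-start index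
--     and an in_math flag instead of repeated str.find scans."""
--     s = str(s)
--     parts = []
--     n = len(s)
--     ws = (' ', '\t', '\n', '\r')
--     start = 0
--     in_math = False
--     for i in range(n):
--         if s[i] != '$':
--             continue
--         if not in_math:
--             nxt = s[i + 1] if i + 1 < n else ''
--             if nxt == '' or nxt in ws:
--                 # invalid opener: this $ stays plain text, but ends the text run
--                 parts.append((s[start:i + 1], False))
--                 start = i + 1
--             else:
--                 if i > start:
--                     parts.append((s[start:i], False))
--                 start = i
--                 in_math = True
--         else:
--             if s[i - 1] not in ws:
--                 parts.append((s[start:i + 1], True))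
--                 start = i + 1
--                 in_math = False
--     if in_math:
--         parts.append((s[start:], False))      # unclosed math -> plain text
--     elif start < n:
--         parts.append((s[start:], False))
--     return parts
-- ===== Notes on version B (the rewrite author's own statement) =====
-- stated objective: alternative
-- what changed: Replaced A's outer while-loop of str.find jumps plus a nested find-based closing-delimiter loop by a single character-by-character state machine that keeps only a segment-start index and an in_math flag, emitting each segment when the state flips.
import Mathlib
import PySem

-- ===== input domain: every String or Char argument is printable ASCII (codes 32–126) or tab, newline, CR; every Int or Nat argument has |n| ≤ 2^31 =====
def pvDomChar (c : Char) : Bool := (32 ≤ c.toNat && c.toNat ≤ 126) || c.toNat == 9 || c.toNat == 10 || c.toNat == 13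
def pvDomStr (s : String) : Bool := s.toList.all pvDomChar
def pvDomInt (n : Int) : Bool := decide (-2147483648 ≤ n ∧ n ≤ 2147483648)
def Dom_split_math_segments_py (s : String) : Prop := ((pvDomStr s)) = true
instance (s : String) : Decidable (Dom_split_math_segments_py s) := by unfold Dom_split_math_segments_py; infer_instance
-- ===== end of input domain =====

-- B replaces A's repeated str.find scans by one character-at-a-time state machine
-- (segment-start index + in_math flag); alternative decomposition, same O(n) cost.
-- ===== PORT A =====

-- whitespace test: `c in (' ', '\t', '\n', '\r')`
def isWsChar (c : Char) : Bool := c == ' ' || c == '\t' || c == '\n' || c == '\r'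

-- s[i] (both programs only read in-range indices, so the default is never returned)
def chAt (cs : List Char) (i : Nat) : Char := cs.getD i ' '

-- s[a:b] for 0 ≤ a ≤ b ≤ len(s) (exactly how both programs use slices)
def pySub (cs : List Char) (a b : Nat) : String := String.ofList ((cs.drop a).take (b - a))

-- hand port of `s.find('$', i)` for 0 ≤ i, as an Option (none ↔ Python's -1):
-- linear scan from i for the single character '$'; exact on this use.
def findDollar (cs : List Char) (i : Nat) : Option Nat :=
  if _h : i < cs.length then
    if chAt cs i = '$' then some i else findDollar cs (i + 1)
  else none
termination_by cs.length - i

-- needed by the ports' decreasing_by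
theorem findDollar_bounds {cs : List Char} {i d : Nat}
    (h : findDollar cs i = some d) : i ≤ d ∧ d < cs.length ∧ chAt cs d = '$' := by
  by_cases hl : i < cs.length
  · rw [findDollar] at h
    simp only [hl, dif_pos] at h
    split at h
    · cases h; exact ⟨le_refl _, hl, by assumption⟩
    · have := findDollar_bounds h
      exact ⟨by omega, this.2.1, this.2.2⟩
  · rw [findDollar] at h; simp [hl] at h
termination_by cs.length - i

-- the inner `while j < len(s)` loop hunting a valid closing '$' (close = -1 ↔ none)
def aClose (cs : List Char) (j : Nat) : Option Nat :=
  if _h : j < cs.length then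
    match hc : findDollar cs j with
    | none => none
    | some cand =>
      if !isWsChar (chAt cs (cand - 1)) then some cand
      else aClose cs (cand + 1)
  else none
termination_by cs.length - j
decreasing_by
  have := findDollar_bounds hc
  omega

-- needed by aLoop's decreasing_by
theorem aClose_bounds {cs : List Char} {j c : Nat}
    (h : aClose cs j = some c) : j ≤ c ∧ c < cs.length := by
  by_cases hl : j < cs.length
  · rw [aClose] at h
    simp only [hl, dif_pos] at h
    split at h
    · exact absurd h (by simp)
    · rename_i cand hfc
      have hfb := findDollar_bounds hfc
      split at h
      · have : cand = c := by injection h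
        omega
      · have := aClose_bounds h
        omega
  · rw [aClose] at h; simp [hl] at h
termination_by cs.length - j
decreasing_by omega

-- the outer `while i < len(s)` loop of A (appends emitted in order)
def aLoop (cs : List Char) (i : Nat) : List (String × Bool) :=
  if _h : i < cs.length then
    match hd : findDollar cs i with
    | none => if i < cs.length then [(pySub cs i cs.length, false)] else []
    | some d =>
      -- next_ch = s[dollar+1] if dollar+1 < len(s) else ''; the test
      -- `next_ch in ws or next_ch == ''` is inlined as one Bool condition
      if (if d + 1 < cs.length then isWsChar (chAt cs (d + 1)) else true) then
        (pySub cs i (d + 1), false) :: aLoop cs (d + 1)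
      else
        (if d > i then [(pySub cs i d, false)] else []) ++
        (match hcl : aClose cs (d + 1) with
         | none => [(pySub cs d cs.length, false)]
         | some close => (pySub cs d (close + 1), true) :: aLoop cs (close + 1))
  else []
termination_by cs.length - i
decreasing_by
  · have := findDollar_bounds hd
    omega
  · have h1 := findDollar_bounds hd
    have h2 := aClose_bounds hcl
    omega

def split_math_segments_py (s : String) : List (String × Bool) := aLoop s.toList 0

-- ===== PORT B =====

-- B's single for-loop: position i, current segment start, in_math flag
def bLoop (cs : List Char) (i start : Nat) (inMath : Bool) : List (String × Bool) :=
  if _h : i < cs.length then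
    if chAt cs i = '$' then
      if !inMath then
        -- nxt = s[i+1] if i+1 < n else ''; `nxt == '' or nxt in ws` inlined
        if (if i + 1 < cs.length then isWsChar (chAt cs (i + 1)) else true) then
          (pySub cs start (i + 1), false) :: bLoop cs (i + 1) (i + 1) false
        else (if i > start then [(pySub cs start i, false)] else []) ++ bLoop cs (i + 1) i true
      else
        if !isWsChar (chAt cs (i - 1)) then
          (pySub cs start (i + 1), true) :: bLoop cs (i + 1) (i + 1) false
        else bLoop cs (i + 1) start true
    else bLoop cs (i + 1) start inMath
  else
    if inMath then [(pySub cs start cs.length, false)]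
    else if start < cs.length then [(pySub cs start cs.length, false)] else []
termination_by cs.length - i

def split_math_segments_py_alt (s : String) : List (String × Bool) := bLoop s.toList 0 0 false

-- ===== PRECONDITION & SPEC =====
def Spec_split_math_segments_py (s : String) (out : List (String × Bool)) : Prop := out = split_math_segments_py_alt s
instance (s : String) (out : List (String × Bool)) : Decidable (Spec_split_math_segments_py s out) := by unfold Spec_split_math_segments_py; infer_instance

-- ===== CLAIM (what is proved, stated in full; the proofs are below) =====
def Claim_equal_split_math_segments_py : Prop := ∀ (s : String), Dom_split_math_segments_py s → Spec_split_math_segments_py s (split_math_segments_py s)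

-- ===== LEMMAS AND PROOFS =====

-- continuation of A's outer loop once a valid opener at d has been found and the
-- close-search has reached position i
def aMathCont (cs : List Char) (d i : Nat) : List (String × Bool) :=
  match aClose cs i with
  | none => [(pySub cs d cs.length, false)]
  | some close => (pySub cs d (close + 1), true) :: aLoop cs (close + 1)

theorem fd_none {cs : List Char} {i : Nat} (h : cs.length ≤ i) : findDollar cs i = none := by
  rw [findDollar]; simp [Nat.not_lt.mpr h]

theorem fd_at {cs : List Char} {i : Nat} (hl : i < cs.length) (hc : chAt cs i = '$') :
    findDollar cs i = some i := by
  rw [findDollar]; simp [hl, hc]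

theorem fd_skip {cs : List Char} : ∀ (i start : Nat), start ≤ i →
    (∀ k, start ≤ k → k < i → chAt cs k ≠ '$') →
    findDollar cs start = findDollar cs i := by
  intro i
  induction i with
  | zero =>
    intro start h _
    have : start = 0 := by omega
    rw [this]
  | succ n ih =>
    intro start h hnd
    rcases Nat.lt_or_ge start (n + 1) with hlt | hge
    · have h1 : findDollar cs start = findDollar cs n :=
        ih start (by omega) (fun k hk1 hk2 => hnd k hk1 (by omega))
      rw [h1]
      by_cases hl : n < cs.length
      · rw [findDollar]; simp [hl, hnd n (by omega) (by omega)]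
      · rw [fd_none (by omega), fd_none (by omega)]
    · have : start = n + 1 := by omega
      rw [this]

-- shape lemmas for the two A-side loops (their defining matches carry a named
-- discriminant for termination, so each branch is exposed separately)
theorem aClose_out {cs : List Char} {j : Nat} (h : cs.length ≤ j) : aClose cs j = none := by
  rw [aClose]; simp [Nat.not_lt.mpr h]

theorem aClose_fdnone {cs : List Char} {j : Nat} (hl : j < cs.length)
    (hf : findDollar cs j = none) : aClose cs j = none := by
  rw [aClose]; simp only [hl, dif_pos]
  split <;> rename_i heq
  · rfl
  · rw [heq] at hf; exact absurd hf (by simp)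

theorem aClose_dollar {cs : List Char} {j cand : Nat} (hl : j < cs.length)
    (hf : findDollar cs j = some cand) :
    aClose cs j = if !isWsChar (chAt cs (cand - 1)) then some cand else aClose cs (cand + 1) := by
  rw [aClose]; simp only [hl, dif_pos]
  split <;> rename_i heq
  · rw [heq] at hf; exact absurd hf (by simp)
  · rw [heq] at hf; injection hf with h2; subst h2; rfl

theorem aLoop_out {cs : List Char} {i : Nat} (h : cs.length ≤ i) : aLoop cs i = [] := by
  rw [aLoop]; simp [Nat.not_lt.mpr h]

theorem aLoop_fdnone {cs : List Char} {i : Nat} (hl : i < cs.length)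
    (hf : findDollar cs i = none) : aLoop cs i = [(pySub cs i cs.length, false)] := by
  rw [aLoop]; simp only [hl, dif_pos]
  split <;> rename_i heq
  · simp [hl]
  · rw [heq] at hf; exact absurd hf (by simp)

theorem aLoop_bad {cs : List Char} {i d : Nat} (hl : i < cs.length)
    (hf : findDollar cs i = some d)
    (hnb : (if d + 1 < cs.length then isWsChar (chAt cs (d + 1)) else true) = true) :
    aLoop cs i = (pySub cs i (d + 1), false) :: aLoop cs (d + 1) := by
  rw [aLoop]; simp only [hl, dif_pos]
  split <;> rename_i heq
  · rw [heq] at hf; exact absurd hf (by simp)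
  · rw [heq] at hf; injection hf with h2; subst h2
    rw [if_pos hnb]

theorem aLoop_unclosed {cs : List Char} {i d : Nat} (hl : i < cs.length)
    (hf : findDollar cs i = some d)
    (hnb : (if d + 1 < cs.length then isWsChar (chAt cs (d + 1)) else true) = false)
    (hac : aClose cs (d + 1) = none) :
    aLoop cs i = (if d > i then [(pySub cs i d, false)] else []) ++
      [(pySub cs d cs.length, false)] := by
  rw [aLoop]; simp only [hl, dif_pos]
  split <;> rename_i heq
  · rw [heq] at hf; exact absurd hf (by simp)
  · rw [heq] at hf; injection hf with h2; subst h2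
    rw [if_neg (by simp [hnb])]
    congr 1
    split <;> rename_i heq2
    · rfl
    · rw [heq2] at hac; exact absurd hac (by simp)

theorem aLoop_closed {cs : List Char} {i d close : Nat} (hl : i < cs.length)
    (hf : findDollar cs i = some d)
    (hnb : (if d + 1 < cs.length then isWsChar (chAt cs (d + 1)) else true) = false)
    (hac : aClose cs (d + 1) = some close) :
    aLoop cs i = (if d > i then [(pySub cs i d, false)] else []) ++
      ((pySub cs d (close + 1), true) :: aLoop cs (close + 1)) := by
  rw [aLoop]; simp only [hl, dif_pos]
  split <;> rename_i heq
  · rw [heq] at hf; exact absurd hf (by simp)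
  · rw [heq] at hf; injection hf with h2; subst h2
    rw [if_neg (by simp [hnb])]
    congr 1
    split <;> rename_i heq2
    · rw [heq2] at hac; exact absurd hac (by simp)
    · rw [heq2] at hac; injection hac with h3; subst h3; rfl

theorem aClose_step {cs : List Char} {j : Nat}
    (h : chAt cs j = '$' → isWsChar (chAt cs (j - 1)) = true) :
    aClose cs j = aClose cs (j + 1) := by
  by_cases hl : j < cs.length
  · by_cases hd : chAt cs j = '$'
    · rw [aClose_dollar hl (fd_at hl hd)]
      simp [h hd]
    · have hfd : findDollar cs j = findDollar cs (j + 1) := by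
        rw [findDollar]; simp [hl, hd]
      rcases hf2 : findDollar cs (j + 1) with _ | cand
      · rw [aClose_fdnone hl (hfd.trans hf2)]
        by_cases hl2 : j + 1 < cs.length
        · rw [aClose_fdnone hl2 hf2]
        · rw [aClose_out (by omega)]
      · have hb := findDollar_bounds hf2
        rw [aClose_dollar hl (hfd.trans hf2), aClose_dollar (by omega) hf2]
  · rw [aClose_out (by omega), aClose_out (by omega)]

-- both loops once the scan position has run off the end of the string
theorem main_end {cs : List Char} {i : Nat} (hl : cs.length ≤ i) :
    (∀ start, start ≤ i → (∀ k, start ≤ k → k < i → chAt cs k ≠ '$') →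
      bLoop cs i start false = aLoop cs start)
    ∧ (∀ d, bLoop cs i d true = aMathCont cs d i) := by
  constructor
  · intro start hsi hnd
    rw [bLoop]
    simp only [Nat.not_lt.mpr hl, dif_neg, not_false_iff, Bool.false_eq_true, if_false]
    by_cases hs : start < cs.length
    · have hf : findDollar cs start = none := by
        rw [fd_skip i start hsi hnd]; exact fd_none hl
      rw [aLoop_fdnone hs hf]
      simp [hs]
    · rw [aLoop_out (by omega)]
      simp [hs]
  · intro d
    rw [bLoop]
    simp only [Nat.not_lt.mpr hl, dif_neg, not_false_iff, if_true]
    unfold aMathCont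
    rw [aClose_out hl]

theorem main_lemma (m : Nat) : ∀ (cs : List Char) (i : Nat), cs.length - i ≤ m →
    (∀ start, start ≤ i → (∀ k, start ≤ k → k < i → chAt cs k ≠ '$') →
      bLoop cs i start false = aLoop cs start)
    ∧ (∀ d, bLoop cs i d true = aMathCont cs d i) := by
  induction m with
  | zero =>
    intro cs i hm
    exact main_end (by omega)
  | succ n ih =>
    intro cs i hm
    by_cases hl : i < cs.length
    · have ihx := ih cs (i + 1) (by omega)
      constructor
      · intro start hsi hnd
        by_cases hc : chAt cs i = '$'
        · -- a '$' at i: A's find from start lands exactly here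
          have hs : start < cs.length := Nat.lt_of_le_of_lt hsi hl
          have hfd : findDollar cs start = some i := by
            rw [fd_skip i start hsi hnd]; exact fd_at hl hc
          rw [bLoop, dif_pos hl]
          simp only [hc, Bool.not_false, reduceIte]
          by_cases hnb : (if i + 1 < cs.length then isWsChar (chAt cs (i + 1)) else true) = true
          · rw [if_pos hnb, aLoop_bad hs hfd hnb,
              ihx.1 (i + 1) (le_refl _) (by intro k h1 h2; omega)]
          · have hnb' : (if i + 1 < cs.length then isWsChar (chAt cs (i + 1)) else true) = false := by
              revert hnb
              cases (if i + 1 < cs.length then isWsChar (chAt cs (i + 1)) else true) <;> simp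
            rw [if_neg hnb, ihx.2 i]
            rcases hac : aClose cs (i + 1) with _ | close
            · rw [aLoop_unclosed hs hfd hnb' hac]
              unfold aMathCont
              rw [hac]
            · rw [aLoop_closed hs hfd hnb' hac]
              unfold aMathCont
              rw [hac]
        · rw [bLoop, dif_pos hl]
          simp only [hc, reduceIte]
          exact ihx.1 start (by omega)
            (fun k h1 h2 => by
              rcases Nat.lt_or_ge k i with h3 | h3
              · exact hnd k h1 h3
              · have : k = i := by omega
                rw [this]; exact hc)
      · intro d
        by_cases hc : chAt cs i = '$'
        · cases hw : isWsChar (chAt cs (i - 1)) with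
          | false =>
            rw [bLoop, dif_pos hl]
            simp only [hc, hw, Bool.not_true, Bool.not_false, Bool.false_eq_true,
              reduceIte]
            rw [ihx.1 (i + 1) (le_refl _) (by intro k h1 h2; omega)]
            unfold aMathCont
            rw [aClose_dollar hl (fd_at hl hc)]
            simp [hw]
          | true =>
            rw [bLoop, dif_pos hl]
            simp only [hc, hw, Bool.not_true, Bool.false_eq_true, reduceIte]
            rw [ihx.2 d]
            unfold aMathCont
            rw [aClose_step (fun _ => hw)]
        · rw [bLoop, dif_pos hl]
          simp only [hc, reduceIte]
          rw [ihx.2 d]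
          unfold aMathCont
          rw [aClose_step (fun h => absurd h hc)]
    · exact main_end (by omega)

-- ===== VERDICT (by name: the statement is the Claim_ definition above) =====
theorem split_math_segments_py_spec : Claim_equal_split_math_segments_py := by
  intro s _
  unfold Spec_split_math_segments_py split_math_segments_py split_math_segments_py_alt
  exact ((main_lemma s.toList.length s.toList 0 (by omega)).1 0 (le_refl _)
    (by intro k h1 h2; omega)).symm
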